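-- pv_equiv track=rewrite | github.com/sopoforic/cgrr-pokemon | pokemon_rby.py | parse_bcd
-- ===== SOURCE A (Python) =====
-- def parse_bcd(b):
--     total = 0
--     p = len(b)*2 - 1
--     for i in range(p + 1):
--         byte = b[i//2]
--         right = bool(i % 2)
--         if not right:
--             total += 10**(p-i) * (byte >> 4)
--         else:
--             total += 10**(p-i) * (byte & 0xf)
--     return total
-- ===== SOURCE B (Python) =====
-- def parse_bcd(b):
--     total = 0
--     for byte in b:
--         total = total * 100 + (byte >> 4) * 10 + (byte & 0xf)
--     return total
-- ===== Notes on version B (the rewrite author's own statement) =====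
-- stated objective: faster
-- what changed: Replaces the loop over 2n digit positions that recomputes the big power 10**(p-i) and does i//2 / i%2 parity bookkeeping at every position by a single Horner-style accumulation (total = total*100 + hi*10 + lo) directly over the bytes.
import Mathlib
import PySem

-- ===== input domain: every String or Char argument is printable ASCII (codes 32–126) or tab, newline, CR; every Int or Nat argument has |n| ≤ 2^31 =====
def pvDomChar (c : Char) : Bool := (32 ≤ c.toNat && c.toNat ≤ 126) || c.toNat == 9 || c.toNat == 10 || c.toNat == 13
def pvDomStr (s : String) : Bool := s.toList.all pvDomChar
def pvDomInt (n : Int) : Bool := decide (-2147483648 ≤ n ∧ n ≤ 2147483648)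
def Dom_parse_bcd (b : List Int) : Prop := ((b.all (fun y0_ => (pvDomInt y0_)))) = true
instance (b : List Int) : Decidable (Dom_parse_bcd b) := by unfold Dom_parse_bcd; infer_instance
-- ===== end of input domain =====

-- B replaces A's positional-power digit loop (fresh 10**(p-i) per digit) by one Horner accumulation over the bytes; a timing run measured B faster.

-- ===== PORT A =====
-- literal port of A: loop over i in range(2*len(b)), indexing b[i//2], parity choosing nibble.
-- b[i//2] is always in range for i in the loop, so pyGetD with default 0 is exact here.
def parse_bcd (b : List Int) : Int :=
  let p : Int := (b.length : Int) * 2 - 1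
  (PySem.List.pyRange 0 (p + 1) 1).foldl
    (fun total i =>
      let byte := PySem.List.pyGetD b (PySem.Int.floordiv i 2) 0
      let right : Bool := PySem.Int.mod i 2 != 0
      if !right then total + 10 ^ (p - i).toNat * (byte >>> 4)
      else total + 10 ^ (p - i).toNat * PySem.Int.band byte 15)
    0

-- ===== PORT B =====
def parse_bcd_alt (b : List Int) : Int :=
  b.foldl (fun (total byte : Int) => total * 100 + (byte >>> 4) * 10 + PySem.Int.band byte 15) 0

-- ===== PRECONDITION & SPEC =====
def Spec_parse_bcd (b : List Int) (out : Int) : Prop := out = parse_bcd_alt b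
instance (b : List Int) (out : Int) : Decidable (Spec_parse_bcd b out) := by unfold Spec_parse_bcd; infer_instance

-- ===== CLAIM (what is proved, stated in full; the proofs are below) =====
def Claim_equal_parse_bcd : Prop := ∀ (b : List Int), Dom_parse_bcd b → Spec_parse_bcd b (parse_bcd b)

-- ===== LEMMAS AND PROOFS =====

lemma B_acc (xs : List Int) (a : Int) :
    xs.foldl (fun (total byte : Int) => total * 100 + (byte >>> 4) * 10 + PySem.Int.band byte 15) a
      = a * 100 ^ xs.length + parse_bcd_alt xs := by
  induction xs generalizing a with
  | nil => simp only [parse_bcd_alt, List.foldl_nil, List.length_nil, pow_zero, mul_one, add_zero]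
  | cons y ys ih =>
      rw [List.foldl_cons, ih]
      conv_rhs => rw [parse_bcd_alt, List.foldl_cons, ih]
      simp only [List.length_cons]
      ring

-- closed sum form of A's fold over the index range
lemma A_sum (b : List Int) :
    parse_bcd b = ((List.range (2 * b.length)).map (fun k =>
      10 ^ (2 * b.length - 1 - k) *
        (if k % 2 = 0 then (PySem.List.pyGetD b ((k / 2 : Nat) : Int) 0) >>> 4
         else PySem.Int.band (PySem.List.pyGetD b ((k / 2 : Nat) : Int) 0) 15))).sum := by
  simp only [parse_bcd]
  have h1 : ((b.length : Int) * 2 - 1 + 1) = ((2 * b.length : Nat) : Int) := by push_cast; ring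
  rw [h1, PySem.List.pyRange_zero_natCast, List.foldl_map]
  rw [PySem.List.foldl_congr_mem (g := fun (total : Int) (k : Nat) =>
        total + 10 ^ (2 * b.length - 1 - k) *
          (if k % 2 = 0 then (PySem.List.pyGetD b ((k / 2 : Nat) : Int) 0) >>> 4
           else PySem.Int.band (PySem.List.pyGetD b ((k / 2 : Nat) : Int) 0) 15))]
  · rw [PySem.List.foldl_add]
    simp
  · intro a k hk
    have hk' : k < 2 * b.length := List.mem_range.mp hk
    have hfd : PySem.Int.floordiv (k : Int) 2 = ((k / 2 : Nat) : Int) := by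
      exact_mod_cast PySem.Int.floordiv_natCast k 2
    have hmd : PySem.Int.mod (k : Int) 2 = ((k % 2 : Nat) : Int) := by
      exact_mod_cast PySem.Int.mod_natCast k 2
    have hpow : (((b.length : Int) * 2 - 1) - (k : Int)).toNat = 2 * b.length - 1 - k := by
      omega
    simp only [hfd, hmd, hpow]
    rcases Nat.mod_two_eq_zero_or_one k with h | h <;> simp [h]

lemma A_cons (x : Int) (xs : List Int) :
    parse_bcd (x :: xs)
      = ((x >>> 4) * 10 + PySem.Int.band x 15) * 100 ^ xs.length + parse_bcd xs := by
  rw [A_sum (x :: xs), A_sum xs]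
  simp only [List.length_cons]
  have hr : 2 * (xs.length + 1) = (2 * xs.length + 1) + 1 := by ring
  rw [hr, List.range_succ_eq_map, List.range_succ_eq_map]
  simp only [List.map_cons, List.map_map, List.sum_cons, Function.comp_def, Nat.succ_eq_add_one]
  have hpt : ∀ k ∈ List.range (2 * xs.length),
      10 ^ (2 * xs.length + 1 + 1 - 1 - (k + 1 + 1)) *
        (if (k + 1 + 1) % 2 = 0 then (PySem.List.pyGetD (x :: xs) (((k + 1 + 1) / 2 : Nat) : Int) 0) >>> 4
         else PySem.Int.band (PySem.List.pyGetD (x :: xs) (((k + 1 + 1) / 2 : Nat) : Int) 0) 15)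
      = 10 ^ (2 * xs.length - 1 - k) *
        (if k % 2 = 0 then (PySem.List.pyGetD xs ((k / 2 : Nat) : Int) 0) >>> 4
         else PySem.Int.band (PySem.List.pyGetD xs ((k / 2 : Nat) : Int) 0) 15) := by
    intro k hk
    have hk' : k < 2 * xs.length := List.mem_range.mp hk
    have h2 : (k + 1 + 1) % 2 = k % 2 := by omega
    have h3 : (k + 1 + 1) / 2 = k / 2 + 1 := by omega
    have h4 : 2 * xs.length + 1 + 1 - 1 - (k + 1 + 1) = 2 * xs.length - 1 - k := by omega
    have h5 : PySem.List.pyGetD (x :: xs) ((k / 2 + 1 : Nat) : Int) 0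
        = PySem.List.pyGetD xs ((k / 2 : Nat) : Int) 0 := by
      rw [PySem.List.pyGetD_natCast, PySem.List.pyGetD_natCast, List.getD_cons_succ]
    rw [h2, h3, h4, h5]
  rw [List.map_congr_left hpt]
  have e0 : 2 * xs.length + 1 + 1 - 1 - 0 = 2 * xs.length + 1 := by omega
  have e1 : 2 * xs.length + 1 + 1 - 1 - (0 + 1) = 2 * xs.length := by omega
  have h10 : (10 : Int) ^ (2 * xs.length) = 100 ^ xs.length := by
    rw [pow_mul]; norm_num
  norm_num [e0, e1, pow_succ, h10]
  ring

-- ===== VERDICT (by name: the statement is the Claim_ definition above) =====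
lemma AB_eq (b : List Int) : parse_bcd b = parse_bcd_alt b := by
  induction b with
  | nil => rfl
  | cons x xs ih =>
      rw [A_cons, ih]
      show _ = List.foldl _ _ (x :: xs)
      rw [List.foldl_cons, B_acc]
      ring

theorem parse_bcd_spec : Claim_equal_parse_bcd := by
  intro b _
  exact AB_eq b
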